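-- pv_equiv track=rewrite | github.com/MichaelSc21/Leetcode-and-algorithm-problems | allConstruct - Dynamic Programming - freeCodeCamp.py | tabulation
-- ===== SOURCE A (Python) =====
-- def tabulation(target, wordBank):
--     def tabulation(target, wordBank):
--         table = [[] for _ in range(len(target) + 1)]
--         table[0] = [[]]
--
--         for i in range(len(table)):
--
--                 for word in wordBank:
--                     if i + len(word) <= len(target):
--                         if target[i:len(word)+i] == word:
--                             for elem in table[i]:
--                                 tempList = [*elem, word]
--                                 table[i+len(word)]  += [tempList]
--                     #table[i + len(word)] = True
--
--         return table[len(target)]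
--
--     return tabulation(target, wordBank)
-- ===== SOURCE B (Python) =====
-- def tabulation(target, wordBank):
--     # Memoized back-recursion: solve(j) = all ways to build target[:j]
--     # (same outer ordering as the forward table: last-word start index i
--     # ascending, then wordBank order, then ways of the shorter prefix).
--     memo = {}
--
--     def solve(j):
--         if j == 0:
--             return [[]]
--         if j in memo:
--             return memo[j]
--         ways = []
--         for i in range(j):
--             for word in wordBank:
--                 if i + len(word) == j and target[i:i + len(word)] == word:
--                     for way in solve(i):
--                         ways.append([*way, word])
--         memo[j] = ways
--         return ways
--
--     return solve(len(target))
-- ===== Notes on version B (the rewrite author's own statement) =====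
-- stated objective: alternative
-- what changed: Replaces the forward-pushing table DP (each position pushes extensions of its ways into later cells) with a memoized backward recursion solve(j) that pulls all ways to build the length-j prefix from shorter prefixes, visiting last-word start indices in the same order so the result list is identical.
import Mathlib
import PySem

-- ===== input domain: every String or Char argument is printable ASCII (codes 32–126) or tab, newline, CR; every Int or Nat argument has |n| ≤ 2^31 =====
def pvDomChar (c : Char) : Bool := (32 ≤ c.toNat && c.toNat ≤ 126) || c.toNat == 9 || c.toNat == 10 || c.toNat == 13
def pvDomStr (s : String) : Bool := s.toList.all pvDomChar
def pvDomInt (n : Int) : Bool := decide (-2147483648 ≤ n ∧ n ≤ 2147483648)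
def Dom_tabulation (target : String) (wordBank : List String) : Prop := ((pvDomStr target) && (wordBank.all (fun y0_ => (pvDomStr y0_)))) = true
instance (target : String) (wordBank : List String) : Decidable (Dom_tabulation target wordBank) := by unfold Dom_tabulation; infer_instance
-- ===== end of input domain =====

-- B replaces A's forward-pushing table DP with a memoized backward recursion over prefix lengths; same result list, same order.
-- Pre_ excludes word banks containing the empty string: there A's inner loop appends to the list it is iterating and never terminates.


-- ===== PORT A =====
-- A's innermost loop: for elem in table[i]: table[i+len(word)] += [[*elem, word]]
def pvElemStep (k : Nat) (w : String) (tb : List (List (List String))) (e : List String) :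
    List (List (List String)) :=
  tb.set k (tb.getD k [] ++ [e ++ [w]])

-- A's word loop body (i fixed): the two guards, then the elem loop over table[i]
def pvWordStep (t : List Char) (n i : Nat) (table : List (List (List String))) (w : String) :
    List (List (List String)) :=
  if i + w.toList.length ≤ n then
    if PySem.List.slice t (some (i : Int)) (some ((w.toList.length : Int) + (i : Int))) = w.toList then
      (table.getD i []).foldl (pvElemStep (i + w.toList.length) w) table
    else table
  else table

-- A's outer loop body: one pass over wordBank
def pvRowStep (t : List Char) (wb : List String) (n : Nat)
    (table : List (List (List String))) (i : Nat) : List (List (List String)) :=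
  wb.foldl (pvWordStep t n i) table

def tabulation (target : String) (wordBank : List String) : List (List String) :=
  let t := target.toList
  let n := t.length
  let table0 := ((List.range (n + 1)).map (fun _ => ([] : List (List String)))).set 0 [[]]
  ((List.range (n + 1)).foldl (pvRowStep t wordBank n) table0).getD n []

-- ===== PORT B =====
-- B: solve j = all ways to build the length-j prefix, pulled from shorter prefixes (memo elided: pure recursion)
def pvSolve (t : List Char) (wb : List String) : Nat → List (List String)
  | 0 => [[]]
  | (j + 1) =>
    (List.range (j + 1)).attach.flatMap (fun p =>
      wb.flatMap (fun w =>
        if p.1 + w.toList.length = j + 1 ∧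
            PySem.List.slice t (some (p.1 : Int)) (some ((p.1 : Int) + (w.toList.length : Int))) = w.toList
        then (pvSolve t wb p.1).map (fun way => way ++ [w])
        else []))
decreasing_by exact List.mem_range.mp p.2

def tabulation_alt (target : String) (wordBank : List String) : List (List String) :=
  pvSolve target.toList wordBank target.toList.length

-- ===== PRECONDITION & SPEC =====
-- Pre_ excludes banks containing "": on those A's elem loop appends to the list being iterated and never returns.
def Pre_tabulation (target : String) (wordBank : List String) : Prop := "" ∉ wordBank
instance (target : String) (wordBank : List String) : Decidable (Pre_tabulation target wordBank) := by
  unfold Pre_tabulation; infer_instance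

def pvWitness_tabulation : String × List String := ("purple", ["purp", "p", "ur", "le", "purpl"])

def Spec_tabulation (target : String) (wordBank : List String) (out : List (List String)) : Prop := out = tabulation_alt target wordBank
instance (target : String) (wordBank : List String) (out : List (List String)) : Decidable (Spec_tabulation target wordBank out) := by unfold Spec_tabulation; infer_instance


-- ===== CLAIM (what is proved, stated in full; the proofs are below) =====
def Claim_equal_tabulation : Prop := ∀ (target : String) (wordBank : List String), Dom_tabulation target wordBank → Pre_tabulation target wordBank → Spec_tabulation target wordBank (tabulation target wordBank)

-- ===== LEMMAS AND PROOFS =====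
lemma pvElemFold (w : String) (k : Nat) :
    ∀ (es : List (List String)) (tb : List (List (List String))), k < tb.length →
      es.foldl (pvElemStep k w) tb = tb.set k (tb.getD k [] ++ es.map (fun e => e ++ [w]))
  | [], tb, hk => by
    simp [List.getD, getElem?_pos tb k hk, List.set_getElem_self]
  | e :: es, tb, hk => by
    rw [List.foldl_cons]
    rw [pvElemFold w k es (pvElemStep k w tb e) (by simp [pvElemStep, hk])]
    simp only [pvElemStep, List.set_set, List.map_cons]
    congr 1
    simp [List.getD, hk]

lemma pvGetD_set_self {α : Type} (l : List α) (k : Nat) (v d : α) (h : k < l.length) :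
    (l.set k v).getD k d = v := by
  simp [List.getD, h]

lemma pvGetD_set_ne {α : Type} (l : List α) (k j : Nat) (v d : α) (h : k ≠ j) :
    (l.set k v).getD j d = l.getD j d := by
  simp only [List.getD, List.getElem?_set_ne h]

lemma pvLen_pos (w : String) (h : w ≠ "") : 1 ≤ w.toList.length := by
  rcases Nat.eq_zero_or_pos w.toList.length with h0 | h1
  · exfalso; apply h; apply String.ext; simpa using List.length_eq_zero_iff.mp h0
  · exact h1

lemma pvSlice_eq (t : List Char) (i len : Nat) :
    PySem.List.slice t (some (i : Int)) (some ((len : Int) + (i : Int))) = (t.drop i).take len := by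
  have h : (len : Int) + (i : Int) = ((len + i : Nat) : Int) := by push_cast; ring
  rw [h, PySem.List.slice_natCast]; congr 1; omega

lemma pvMatch_le (t : List Char) (i : Nat) (w : String) (hw : w ≠ "")
    (h : PySem.List.slice t (some (i : Int)) (some ((w.toList.length : Int) + (i : Int))) = w.toList) :
    i + w.toList.length ≤ t.length := by
  rw [pvSlice_eq] at h
  have hl : ((t.drop i).take w.toList.length).length = w.toList.length := by rw [h]
  have hlw := pvLen_pos w hw
  simp only [List.length_take, List.length_drop] at hl
  omega

def pvWContrib (t : List Char) (src : List (List String)) (n i : Nat)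
    (ws : List String) (j : Nat) : List (List String) :=
  ws.flatMap (fun w =>
    if i + w.toList.length = j ∧ i + w.toList.length ≤ n ∧
        PySem.List.slice t (some (i : Int)) (some ((w.toList.length : Int) + (i : Int))) = w.toList
    then src.map (fun e => e ++ [w]) else [])

lemma pvWordFold (t : List Char) (n i : Nat)
    (ws : List String) (hws : ∀ w ∈ ws, w ≠ "") :
    ∀ (table : List (List (List String))), table.length = n + 1 →
      (ws.foldl (pvWordStep t n i) table).length = n + 1 ∧
      ∀ j, (ws.foldl (pvWordStep t n i) table).getD j [] =
        table.getD j [] ++ pvWContrib t (table.getD i []) n i ws j := by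
  induction ws with
  | nil =>
    intro table hlen
    refine ⟨hlen, fun j => ?_⟩
    rw [List.foldl_nil]
    simp [pvWContrib]
  | cons w ws ih =>
    intro table hlen
    have hw : w ≠ "" := hws w (List.mem_cons_self)
    have hws' : ∀ w' ∈ ws, w' ≠ "" := fun w' h => hws w' (List.mem_cons_of_mem _ h)
    have hlw := pvLen_pos w hw
    rw [List.foldl_cons]
    by_cases h1 : i + w.toList.length ≤ n
    · by_cases h2 : PySem.List.slice t (some (i : Int))
          (some ((w.toList.length : Int) + (i : Int))) = w.toList
      · have hk : i + w.toList.length < table.length := by omega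
        have hstep : pvWordStep t n i table w =
            table.set (i + w.toList.length)
              (table.getD (i + w.toList.length) [] ++
                (table.getD i []).map (fun e => e ++ [w])) := by
          rw [pvWordStep, if_pos h1, if_pos h2, pvElemFold w _ _ table hk]
        rw [hstep]
        obtain ⟨ihlen, ihget⟩ := ih hws'
          (table.set (i + w.toList.length)
            (table.getD (i + w.toList.length) [] ++
              (table.getD i []).map (fun e => e ++ [w])))
          (by rw [List.length_set]; exact hlen)
        refine ⟨ihlen, fun j => ?_⟩
        rw [ihget j,
          pvGetD_set_ne _ _ _ _ _ (by omega : i + w.toList.length ≠ i)]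
        by_cases hj : j = i + w.toList.length
        · subst hj
          rw [pvGetD_set_self _ _ _ _ hk]
          simp only [pvWContrib, List.flatMap_cons]
          split_ifs with hc
          · rw [List.append_assoc]
          · exact absurd ⟨by trivial, h1, h2⟩ hc
        · rw [pvGetD_set_ne _ _ _ _ _ (fun h => hj h.symm)]
          simp only [pvWContrib, List.flatMap_cons]
          split_ifs with hc
          · exact (hj hc.1.symm).elim
          · rw [List.nil_append]
      · rw [pvWordStep, if_pos h1, if_neg h2]
        obtain ⟨ihlen, ihget⟩ := ih hws' table hlen
        refine ⟨ihlen, fun j => ?_⟩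
        rw [ihget j]
        simp only [pvWContrib, List.flatMap_cons]
        split_ifs with hc
        · exact (h2 hc.2.2).elim
        · rw [List.nil_append]
    · rw [pvWordStep, if_neg h1]
      obtain ⟨ihlen, ihget⟩ := ih hws' table hlen
      refine ⟨ihlen, fun j => ?_⟩
      rw [ihget j]
      simp only [pvWContrib, List.flatMap_cons]
      split_ifs with hc
      · exact (h1 hc.2.1).elim
      · rw [List.nil_append]

def pvContrib (t : List Char) (wb : List String) (j i : Nat) : List (List String) :=
  wb.flatMap (fun w =>
    if i + w.toList.length = j ∧
        PySem.List.slice t (some (i : Int)) (some ((w.toList.length : Int) + (i : Int))) = w.toList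
    then (pvSolve t wb i).map (fun e => e ++ [w]) else [])

lemma pvSolve_succ (t : List Char) (wb : List String) (j : Nat) :
    pvSolve t wb (j + 1) = (List.range (j + 1)).flatMap (pvContrib t wb (j + 1)) := by
  rw [pvSolve]
  simp only [List.flatMap_subtype, List.unattach_attach]
  refine List.flatMap_congr (fun i hi => ?_)
  refine List.flatMap_congr (fun w hw => ?_)
  have h : (i : Int) + (w.toList.length : Int) = (w.toList.length : Int) + (i : Int) := by ring
  rw [h]

lemma pvContrib_nil (t : List Char) (wb : List String) (hwb : "" ∉ wb) (j i : Nat) (h : j ≤ i) :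
    pvContrib t wb j i = [] := by
  rw [pvContrib, List.flatMap_eq_nil_iff]
  intro w hw
  have hw' : w ≠ "" := fun h' => hwb (h' ▸ hw)
  have hlw := pvLen_pos w hw'
  rw [if_neg (fun hc => absurd hc.1 (by omega))]

lemma pvSolve_eq_init (t : List Char) (wb : List String) (m : Nat) :
    (if m = 0 then ([[]] : List (List String)) else []) ++
        (List.range m).flatMap (pvContrib t wb m) = pvSolve t wb m := by
  cases m with
  | zero => simp [pvSolve]
  | succ j => rw [pvSolve_succ]; simp

lemma pvWContrib_eq_pvContrib (t : List Char) (wb : List String) (hwb : "" ∉ wb)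
    (k j : Nat) :
    pvWContrib t (pvSolve t wb k) t.length k wb j = pvContrib t wb j k := by
  rw [pvWContrib, pvContrib]
  refine List.flatMap_congr (fun w hw => ?_)
  have hw' : w ≠ "" := fun h' => hwb (h' ▸ hw)
  by_cases hc : k + w.toList.length = j ∧
      PySem.List.slice t (some (k : Int)) (some ((w.toList.length : Int) + (k : Int))) = w.toList
  · rw [if_pos ⟨hc.1, pvMatch_le t k w hw' hc.2, hc.2⟩, if_pos hc]
  · rw [if_neg (fun hx => hc ⟨hx.1, hx.2.2⟩), if_neg hc]

lemma pvOuter (t : List Char) (wb : List String) (hwb : "" ∉ wb) :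
    ∀ k, k ≤ t.length + 1 →
      ((List.range k).foldl (pvRowStep t wb t.length)
          (((List.range (t.length + 1)).map (fun _ => ([] : List (List String)))).set 0 [[]])).length
        = t.length + 1 ∧
      ∀ j, ((List.range k).foldl (pvRowStep t wb t.length)
          (((List.range (t.length + 1)).map (fun _ => ([] : List (List String)))).set 0 [[]])).getD j []
        = (if j = 0 then ([[]] : List (List String)) else []) ++
            (List.range k).flatMap (fun i => pvContrib t wb j i) := by
  intro k
  induction k with
  | zero =>
    intro _
    constructor
    · simp
    · intro j
      rw [List.range_zero, List.foldl_nil, List.flatMap_nil, List.append_nil]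
      by_cases hj : j = 0
      · subst hj
        rw [if_pos rfl, pvGetD_set_self _ _ _ _ (by simp)]
      · rw [if_neg hj, pvGetD_set_ne _ _ _ _ _ (fun h => hj h.symm), List.getD]
        rw [List.getElem?_map]
        cases h : (List.range (t.length + 1))[j]? <;> simp
  | succ k ih =>
    intro hk
    obtain ⟨ihlen, ihget⟩ := ih (by omega)
    have hws : ∀ w ∈ wb, w ≠ "" := fun w hw h' => hwb (h' ▸ hw)
    have hr : List.range (k + 1) = List.range k ++ [k] := List.range_succ
    rw [hr, List.foldl_append, List.foldl_cons, List.foldl_nil]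
    obtain ⟨flen, fget⟩ := pvWordFold t t.length k wb hws _ ihlen
    refine ⟨flen, fun j => ?_⟩
    rw [pvRowStep, fget j, ihget j, ihget k, pvSolve_eq_init,
      pvWContrib_eq_pvContrib t wb hwb k j]
    simp [List.flatMap_append, List.append_assoc]


-- ===== VERDICT (by name: the statement is the Claim_ definition above) =====
theorem tabulation_spec : Claim_equal_tabulation := by
  intro target wb _ hpre
  unfold Spec_tabulation tabulation tabulation_alt
  obtain ⟨_, hget⟩ := pvOuter target.toList wb hpre (target.toList.length + 1) (by omega)
  rw [hget]
  have hr : List.range (target.toList.length + 1) =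
      List.range target.toList.length ++ [target.toList.length] := List.range_succ
  rw [hr, List.flatMap_append,
    show List.flatMap (fun i => pvContrib target.toList wb target.toList.length i)
        [target.toList.length] = [] by
      simp [pvContrib_nil target.toList wb hpre _ _ le_rfl],
    List.append_nil, pvSolve_eq_init]
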